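-- pv_equiv track=rewrite | github.com/edson-gonzales/sudoku2015-B | src/console/sudokuio.py | fill_rows
-- ===== SOURCE A (Python) =====
-- def fill_rows(grid, row, grid_string):
--     """ Fill the row of a grid in the grid_string variable
--
--     return string - return the current representation of a grid in the sudoku format but by row.
--     """
--     for col in range (len(grid[row])):
--         if (col == len(grid[row])-1):
--             grid_string = grid_string + str(grid[row][col]) + '\n'
--         elif (col % 3 == 2):
--             grid_string = grid_string + str(grid[row][col]) + '|'
--         else:
--             grid_string = grid_string + str(grid[row][col]) + ' '
--     if (row % 3 == 2):
--         grid_string = grid_string + '------------------\n'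
--     return grid_string
-- ===== SOURCE B (Python) =====
-- def _chunks3(cells):
--     """Successive chunks of 3 cells."""
--     if not cells:
--         return []
--     return [cells[:3]] + _chunks3(cells[3:])
--
-- def fill_rows(grid, row, grid_string):
--     """ Fill the row of a grid in the grid_string variable
--
--     return string - return the current representation of a grid in the sudoku format but by row.
--     """
--     cells = grid[row]
--     if cells:
--         grid_string += '|'.join(' '.join(str(c) for c in chunk)
--                                 for chunk in _chunks3(cells)) + '\n'
--     if row % 3 == 2:
--         grid_string += '------------------\n'
--     return grid_string
-- ===== Notes on version B (the rewrite author's own statement) =====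
-- stated objective: idiomatic
-- what changed: Replaces the per-index loop with positional if/elif branching by slicing the row into 3-cell chunks, joining cells with ' ' and chunks with '|', instead of deciding each cell's separator from its index.
import Mathlib
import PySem

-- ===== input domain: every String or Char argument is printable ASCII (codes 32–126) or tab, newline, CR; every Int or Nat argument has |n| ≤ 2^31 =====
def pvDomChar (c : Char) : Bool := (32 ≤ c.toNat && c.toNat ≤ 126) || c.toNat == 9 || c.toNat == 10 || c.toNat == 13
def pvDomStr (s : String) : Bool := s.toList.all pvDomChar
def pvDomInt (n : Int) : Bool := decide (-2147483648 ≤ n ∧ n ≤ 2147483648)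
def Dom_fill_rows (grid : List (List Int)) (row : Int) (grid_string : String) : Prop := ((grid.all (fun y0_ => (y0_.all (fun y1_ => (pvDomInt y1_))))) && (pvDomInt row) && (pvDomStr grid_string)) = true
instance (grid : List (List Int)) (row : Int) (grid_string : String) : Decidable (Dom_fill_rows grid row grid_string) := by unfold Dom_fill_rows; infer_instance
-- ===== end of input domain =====

-- B replaces A's per-index loop (separator chosen by positional branching on col) with a
-- chunk-into-threes then join decomposition; same output, idiomatic restructuring (objective: idiomatic).


-- ===== PORT A =====
-- literal transliteration: for col in range(len(grid[row])) with the three branches in order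
def fill_rows (grid : List (List Int)) (row : Int) (grid_string : String) : String :=
  let cells := PySem.List.pyGetD grid row []   -- grid[row]; Pre_ excludes the IndexError case
  let gs := (PySem.List.pyRange 0 (cells.length : Int) 1).foldl
    (fun acc col =>
      if col == (cells.length : Int) - 1 then
        acc ++ PySem.Int.toStr (PySem.List.pyGetD cells col 0) ++ "\n"
      else if PySem.Int.mod col 3 == 2 then
        acc ++ PySem.Int.toStr (PySem.List.pyGetD cells col 0) ++ "|"
      else
        acc ++ PySem.Int.toStr (PySem.List.pyGetD cells col 0) ++ " ") grid_string
  if PySem.Int.mod row 3 == 2 then gs ++ "------------------\n" else gs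

-- ===== PORT B =====
-- _chunks3(cells): [] if not cells else [cells[:3]] + _chunks3(cells[3:])
def chunks3 : List Int → List (List Int)
  | [] => []
  | a :: rest => ((a :: rest).take 3) :: chunks3 ((a :: rest).drop 3)
termination_by cells => cells.length
decreasing_by simp

def fill_rows_alt (grid : List (List Int)) (row : Int) (grid_string : String) : String :=
  let cells := PySem.List.pyGetD grid row []   -- grid[row]
  let gs := if cells.isEmpty then grid_string
            else grid_string ++
              PySem.Str.join "|" ((chunks3 cells).map
                (fun chunk => PySem.Str.join " " (chunk.map PySem.Int.toStr))) ++ "\n"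
  if PySem.Int.mod row 3 == 2 then gs ++ "------------------\n" else gs

-- ===== PRECONDITION & SPEC =====
-- Pre_ excludes exactly the inputs where Python A raises IndexError on grid[row].
def Pre_fill_rows (grid : List (List Int)) (row : Int) (grid_string : String) : Prop :=
  PySem.Raise.InRange grid.length row
instance (grid : List (List Int)) (row : Int) (grid_string : String) : Decidable (Pre_fill_rows grid row grid_string) := by unfold Pre_fill_rows; infer_instance
def pvWitness_fill_rows : List (List Int) × Int × String := ([[5, 3, 4, 6, 7, 8, 9, 1, 2]], 0, "")

def Spec_fill_rows (grid : List (List Int)) (row : Int) (grid_string : String) (out : String) : Prop := out = fill_rows_alt grid row grid_string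
instance (grid : List (List Int)) (row : Int) (grid_string : String) (out : String) : Decidable (Spec_fill_rows grid row grid_string out) := by unfold Spec_fill_rows; infer_instance

-- ===== CLAIM (what is proved, stated in full; the proofs are below) =====
def Claim_equal_fill_rows : Prop := ∀ (grid : List (List Int)) (row : Int) (grid_string : String), Dom_fill_rows grid row grid_string → Pre_fill_rows grid row grid_string → Spec_fill_rows grid row grid_string (fill_rows grid row grid_string)

-- ===== LEMMAS AND PROOFS =====

-- A's loop over the enumerated cells, generalized to a chunk-aligned start index s and a
-- fixed total length N, produces exactly B's chunk-then-join string.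
theorem loopA_eq (cells : List Int) (s : Nat) (hs : s % 3 = 0) (N : Int)
    (hN : N = (s : Int) + cells.length) (gs : String) :
    (PySem.List.enumerate cells (s : Int)).foldl
      (fun acc p =>
        if p.1 == N - 1 then acc ++ PySem.Int.toStr p.2 ++ "\n"
        else if PySem.Int.mod p.1 3 == 2 then acc ++ PySem.Int.toStr p.2 ++ "|"
        else acc ++ PySem.Int.toStr p.2 ++ " ") gs
    = if cells.isEmpty then gs
      else gs ++ PySem.Str.join "|" ((chunks3 cells).map
             (fun chunk => PySem.Str.join " " (chunk.map PySem.Int.toStr))) ++ "\n" := by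
  have hm : ∀ x : Int, PySem.Int.mod x 3 = x % 3 :=
    fun x => PySem.Int.mod_eq_emod_of_pos (by norm_num)
  match cells with
  | [] => simp [PySem.List.enumerate_nil]
  | [a] =>
    have hlen : N = (s : Int) + 1 := by simpa using hN
    have e1 : (((s : Int)) == N - 1) = true := beq_iff_eq.mpr (by omega)
    simp only [PySem.List.enumerate_cons, PySem.List.enumerate_nil, List.foldl_cons,
      List.foldl_nil]
    apply String.toList_inj.mp
    simp [e1, chunks3, PySem.Str.toList_join, PySem.Chars.join_singleton, String.toList_append]
  | [a, b] =>
    have hlen : N = (s : Int) + 2 := by simp at hN; omega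
    have e1 : (((s : Int)) == N - 1) = false := beq_eq_false_iff_ne.mpr (by omega)
    have e2 : (PySem.Int.mod ((s : Int)) 3 == 2) = false := by
      rw [hm]; exact beq_eq_false_iff_ne.mpr (by omega)
    have e3 : (((s : Int) + 1) == N - 1) = true := beq_iff_eq.mpr (by omega)
    simp only [PySem.List.enumerate_cons, PySem.List.enumerate_nil, List.foldl_cons,
      List.foldl_nil]
    apply String.toList_inj.mp
    have p0 : ¬(((s : Int)) % 3 = 2) := by omega
    simp [e1, e3, p0, chunks3, PySem.Str.toList_join, PySem.Chars.join_singleton,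
      PySem.Chars.join_cons_cons, String.toList_append]
  | [a, b, c] =>
    have hlen : N = (s : Int) + 3 := by simp at hN; omega
    have e1 : (((s : Int)) == N - 1) = false := beq_eq_false_iff_ne.mpr (by omega)
    have e2 : (PySem.Int.mod ((s : Int)) 3 == 2) = false := by
      rw [hm]; exact beq_eq_false_iff_ne.mpr (by omega)
    have e3 : (((s : Int) + 1) == N - 1) = false := beq_eq_false_iff_ne.mpr (by omega)
    have e4 : (PySem.Int.mod ((s : Int) + 1) 3 == 2) = false := by
      rw [hm]; exact beq_eq_false_iff_ne.mpr (by omega)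
    have e5 : (((s : Int) + 1 + 1) == N - 1) = true := beq_iff_eq.mpr (by omega)
    simp only [PySem.List.enumerate_cons, PySem.List.enumerate_nil, List.foldl_cons,
      List.foldl_nil]
    apply String.toList_inj.mp
    have p0 : ¬(((s : Int)) % 3 = 2) := by omega
    have p1 : ¬(((s : Int) + 1) % 3 = 2) := by omega
    simp [e1, e3, e5, p0, p1, chunks3, PySem.Str.toList_join, PySem.Chars.join_singleton,
      PySem.Chars.join_cons_cons, String.toList_append]
  | a :: b :: c :: d :: rest =>
    have hlen : N = (s : Int) + 4 + rest.length := by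
      simp at hN; omega
    have e1 : (((s : Int)) == N - 1) = false := beq_eq_false_iff_ne.mpr (by omega)
    have e2 : (PySem.Int.mod ((s : Int)) 3 == 2) = false := by
      rw [hm]; exact beq_eq_false_iff_ne.mpr (by omega)
    have e3 : (((s : Int) + 1) == N - 1) = false := beq_eq_false_iff_ne.mpr (by omega)
    have e4 : (PySem.Int.mod ((s : Int) + 1) 3 == 2) = false := by
      rw [hm]; exact beq_eq_false_iff_ne.mpr (by omega)
    have e5 : (((s : Int) + 1 + 1) == N - 1) = false := beq_eq_false_iff_ne.mpr (by omega)
    have e6 : (PySem.Int.mod ((s : Int) + 1 + 1) 3 == 2) = true := by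
      rw [hm]; exact beq_iff_eq.mpr (by omega)
    rw [PySem.List.enumerate_cons, List.foldl_cons, PySem.List.enumerate_cons,
      List.foldl_cons, PySem.List.enumerate_cons, List.foldl_cons]
    simp only [e1, e2, e3, e4, e5, e6, Bool.false_eq_true, if_false, if_true]
    have hstart : ((s : Int) + 1 + 1 + 1) = ((s + 3 : Nat) : Int) := by push_cast; ring
    rw [hstart]
    rw [loopA_eq (d :: rest) (s + 3) (by omega) N (by simp; omega)]
    apply String.toList_inj.mp
    simp [chunks3, PySem.Str.toList_join, PySem.Chars.join_singleton,
      PySem.Chars.join_cons_cons, String.toList_append]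
termination_by cells.length

-- ===== VERDICT (by name: the statement is the Claim_ definition above) =====
theorem fill_rows_spec : Claim_equal_fill_rows := by
  intro grid row grid_string _ _
  unfold Spec_fill_rows fill_rows fill_rows_alt
  set cells := PySem.List.pyGetD grid row [] with hc
  have key := loopA_eq cells 0 rfl (cells.length : Int) (by simp) grid_string
  simp only [Nat.cast_zero] at key
  rw [PySem.List.enumerate_eq_map_pyRange cells 0, List.foldl_map] at key
  simp only [PySem.List.len_eq] at key
  simp only []
  rw [key]
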